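-- pv_equiv track=rewrite | github.com/Bisue/problem-solving | programmers/lv3/258709.py | calcWins
-- ===== SOURCE A (Python) =====
-- def calcWins(casesDict1, casesDict2):
--     sortedVal1 = sorted(casesDict1.keys(), reverse=True)
--     sortedVal2 = sorted(casesDict2.keys())
--
--     wins = 0
--     for i in range(len(sortedVal1)):
--         for j in range(len(sortedVal2)):
--             if sortedVal1[i] > sortedVal2[j]:
--                 wins += casesDict1[sortedVal1[i]] * casesDict2[sortedVal2[j]]
--
--     return wins
-- ===== SOURCE B (Python) =====
-- def calcWins(casesDict1, casesDict2):
--     items1 = sorted(casesDict1.items(), key=lambda p: p[0])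
--     items2 = sorted(casesDict2.items(), key=lambda p: p[0])
--     wins = 0
--     acc = 0
--     j = 0
--     for k1, v1 in items1:
--         while j < len(items2) and items2[j][0] < k1:
--             acc += items2[j][1]
--             j += 1
--         wins += v1 * acc
--     return wins
-- ===== Notes on version B (the rewrite author's own statement) =====
-- stated objective: faster
-- what changed: A sorts the key lists and then runs a full nested O(n*m) double loop with a dict lookup per pair; B sorts both item lists once and does a single two-pointer sweep that carries a running prefix sum of dict2 values below the current dict1 key.
import Mathlib
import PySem

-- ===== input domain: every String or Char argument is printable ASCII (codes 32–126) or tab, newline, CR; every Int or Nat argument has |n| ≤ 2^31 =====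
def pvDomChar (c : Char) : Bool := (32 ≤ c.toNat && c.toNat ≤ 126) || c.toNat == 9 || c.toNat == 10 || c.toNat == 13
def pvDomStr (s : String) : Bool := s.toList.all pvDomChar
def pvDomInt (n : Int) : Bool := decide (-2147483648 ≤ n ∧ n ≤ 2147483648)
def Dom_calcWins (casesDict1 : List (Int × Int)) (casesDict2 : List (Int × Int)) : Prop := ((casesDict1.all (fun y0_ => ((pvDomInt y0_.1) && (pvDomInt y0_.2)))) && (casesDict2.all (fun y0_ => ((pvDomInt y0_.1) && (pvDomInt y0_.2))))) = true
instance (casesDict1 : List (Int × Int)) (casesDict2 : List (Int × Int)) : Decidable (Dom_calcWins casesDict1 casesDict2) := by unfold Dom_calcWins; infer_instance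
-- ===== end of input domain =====

-- B replaces A's nested scan over all key pairs by sort-both + a single two-pointer sweep with a running prefix sum (objective: faster).


-- ===== PORT A =====
-- literal port of A; the dict arguments arrive as association lists and are read as Python dicts
-- (PySem.Dict.ofList).  d[k] is ported as Dict.getD _ k 0, exact here because every looked-up key
-- is a key of that dict (so Python's lookup never raises).
def calcWins (casesDict1 : List (Int × Int)) (casesDict2 : List (Int × Int)) : Int :=
  let d1 := PySem.Dict.ofList casesDict1
  let d2 := PySem.Dict.ofList casesDict2
  let sortedVal1 := PySem.List.sorted d1.keys (fun k => k) true
  let sortedVal2 := PySem.List.sorted d2.keys (fun k => k) false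
  (PySem.List.pyRange 0 (sortedVal1.length : Int) 1).foldl
    (fun wins i =>
      (PySem.List.pyRange 0 (sortedVal2.length : Int) 1).foldl
        (fun wins j =>
          if PySem.List.pyGetD sortedVal1 i 0 > PySem.List.pyGetD sortedVal2 j 0 then
            wins + d1.getD (PySem.List.pyGetD sortedVal1 i 0) 0 * d2.getD (PySem.List.pyGetD sortedVal2 j 0) 0
          else wins)
        wins)
    0

-- ===== PORT B =====
-- the inner `while` of Source B: consume the items2 entries with key < k1, adding their values to acc
-- (the index j of Source B is represented by the not-yet-consumed suffix of items2)
def pvAdvance (k1 : Int) : List (Int × Int) → Int → Int × List (Int × Int)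
  | [], acc => (acc, [])
  | (k2, v2) :: t, acc =>
      if k2 < k1 then pvAdvance k1 t (acc + v2) else (acc, (k2, v2) :: t)

-- the `for` loop of Source B over items1, carrying (remaining items2, acc, wins)
def pvSweep : List (Int × Int) → List (Int × Int) → Int → Int → Int
  | [], _, _, wins => wins
  | (k1, v1) :: t1, rest2, acc, wins =>
      let r := pvAdvance k1 rest2 acc
      pvSweep t1 r.2 r.1 (wins + v1 * r.1)

def calcWins_alt (casesDict1 : List (Int × Int)) (casesDict2 : List (Int × Int)) : Int :=
  let items1 := PySem.List.sorted (PySem.Dict.ofList casesDict1).items (fun p => p.1) false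
  let items2 := PySem.List.sorted (PySem.Dict.ofList casesDict2).items (fun p => p.1) false
  pvSweep items1 items2 0 0

-- ===== PRECONDITION & SPEC =====
def Spec_calcWins (casesDict1 : List (Int × Int)) (casesDict2 : List (Int × Int)) (out : Int) : Prop := out = calcWins_alt casesDict1 casesDict2
instance (casesDict1 : List (Int × Int)) (casesDict2 : List (Int × Int)) (out : Int) : Decidable (Spec_calcWins casesDict1 casesDict2 out) := by unfold Spec_calcWins; infer_instance

-- ===== CLAIM (what is proved, stated in full; the proofs are below) =====
def Claim_equal_calcWins : Prop := ∀ (casesDict1 : List (Int × Int)) (casesDict2 : List (Int × Int)), Dom_calcWins casesDict1 casesDict2 → Spec_calcWins casesDict1 casesDict2 (calcWins casesDict1 casesDict2)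

-- ===== LEMMAS AND PROOFS =====

-- the common mathematical value both programs compute:
-- Σ_{(k1,v1) ∈ its1} v1 · Σ_{(k2,v2) ∈ its2, k2 < k1} v2
def pvM (its1 its2 : List (Int × Int)) : Int :=
  (its1.map (fun p => p.2 * ((its2.map (fun q => if q.1 < p.1 then q.2 else 0)).sum))).sum

theorem pv_ite_add_right (c : Prop) [Decidable c] (w x : Int) :
    (if c then w + x else w) = w + (if c then x else 0) := by split <;> simp

theorem pv_sum_perm {α : Type} {l l' : List α} (h : l.Perm l') (f : α → Int) :
    (l.map f).sum = (l'.map f).sum := (h.map f).sum_eq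

theorem pv_sum_map_filter {α : Type} (l : List α) (p : α → Bool) (f : α → Int) :
    ((l.filter p).map f).sum = (l.map (fun x => if p x then f x else 0)).sum := by
  induction l with
  | nil => simp
  | cons a t ih => by_cases h : p a = true <;> simp [h, ih]

-- A's double index loop, as a double sum over the two lists it indexes
theorem pv_double (s1 s2 : List Int) (g : Int → Int → Int) :
    (PySem.List.pyRange 0 (s1.length : Int) 1).foldl
      (fun wins i =>
        (PySem.List.pyRange 0 (s2.length : Int) 1).foldl
          (fun w j => if PySem.List.pyGetD s1 i 0 > PySem.List.pyGetD s2 j 0 then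
              w + g (PySem.List.pyGetD s1 i 0) (PySem.List.pyGetD s2 j 0) else w) wins) 0
    = (s1.map (fun k1 => (s2.map (fun k2 => if k2 < k1 then g k1 k2 else 0)).sum)).sum := by
  have inner : ∀ (k1 wins : Int),
      (PySem.List.pyRange 0 (s2.length : Int) 1).foldl
        (fun w j => if k1 > PySem.List.pyGetD s2 j 0 then w + g k1 (PySem.List.pyGetD s2 j 0) else w) wins
      = wins + (s2.map (fun k2 => if k2 < k1 then g k1 k2 else 0)).sum := by
    intro k1 wins
    rw [PySem.List.foldl_pyRange_zero_pyGetD' s2 0 (fun w k2 => if k1 > k2 then w + g k1 k2 else w) wins]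
    simp only [pv_ite_add_right, PySem.List.foldl_add, gt_iff_lt]
  rw [PySem.List.foldl_pyRange_zero_pyGetD' s1 0 (fun wins k1 =>
      (PySem.List.pyRange 0 (s2.length : Int) 1).foldl
        (fun w j => if k1 > PySem.List.pyGetD s2 j 0 then w + g k1 (PySem.List.pyGetD s2 j 0) else w) wins) 0]
  have hfun : (fun wins k1 =>
      (PySem.List.pyRange 0 (s2.length : Int) 1).foldl
        (fun w j => if k1 > PySem.List.pyGetD s2 j 0 then w + g k1 (PySem.List.pyGetD s2 j 0) else w) wins)
      = (fun wins k1 => wins + (s2.map (fun k2 => if k2 < k1 then g k1 k2 else 0)).sum) := by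
    funext wins k1; exact inner k1 wins
  rw [hfun, PySem.List.foldl_add, zero_add]

theorem pv_A_eq (l1 l2 : List (Int × Int)) :
    calcWins l1 l2 = pvM (PySem.Dict.ofList l1).items (PySem.Dict.ofList l2).items := by
  unfold calcWins
  rw [pv_double _ _ (fun k1 k2 => (PySem.Dict.ofList l1).getD k1 0 * (PySem.Dict.ofList l2).getD k2 0)]
  rw [pv_sum_perm (PySem.List.sorted_perm _ _ _)]
  have h2 : ∀ k1 : Int,
      ((PySem.List.sorted (PySem.Dict.ofList l2).keys (fun k => k) false).map
        (fun k2 => if k2 < k1 then (PySem.Dict.ofList l1).getD k1 0 * (PySem.Dict.ofList l2).getD k2 0 else 0)).sum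
      = ((PySem.Dict.ofList l2).keys.map
        (fun k2 => if k2 < k1 then (PySem.Dict.ofList l1).getD k1 0 * (PySem.Dict.ofList l2).getD k2 0 else 0)).sum :=
    fun k1 => pv_sum_perm (PySem.List.sorted_perm _ _ _) _
  simp only [h2]
  unfold pvM
  rw [PySem.Dict.items_eq_map_keys (PySem.Dict.ofList l1) (PySem.Dict.nodup_keys_ofList l1) 0,
      PySem.Dict.items_eq_map_keys (PySem.Dict.ofList l2) (PySem.Dict.nodup_keys_ofList l2) 0]
  simp only [List.map_map, Function.comp_def, ← List.sum_map_mul_left, mul_ite, mul_zero]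

-- the `while` loop is takeWhile/dropWhile plus the prefix sum of the consumed values
theorem pvAdvance_eq (k1 : Int) (l : List (Int × Int)) (acc : Int) :
    pvAdvance k1 l acc
      = (acc + ((l.takeWhile (fun q => decide (q.1 < k1))).map (·.2)).sum,
         l.dropWhile (fun q => decide (q.1 < k1))) := by
  induction l generalizing acc with
  | nil => simp [pvAdvance]
  | cons a t ih =>
      obtain ⟨k2, v2⟩ := a
      by_cases h : k2 < k1
      · simp [pvAdvance, h, ih, add_assoc]
      · simp [pvAdvance, h]

theorem pv_filter_eq_takeWhile (k : Int) (l : List (Int × Int))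
    (hs : l.Pairwise (fun a b => a.1 ≤ b.1)) :
    l.filter (fun q => decide (q.1 < k)) = l.takeWhile (fun q => decide (q.1 < k)) := by
  induction l with
  | nil => simp
  | cons a t ih =>
      rcases List.pairwise_cons.mp hs with ⟨ha, ht⟩
      by_cases h : a.1 < k
      · simp [h, ih ht]
      · have hnil : t.filter (fun q => decide (q.1 < k)) = [] := by
          apply List.filter_eq_nil_iff.mpr
          intro q hq
          simp only [decide_eq_true_eq]
          exact fun hlt => h (lt_of_le_of_lt (ha q hq) hlt)
        simp [h, hnil]

-- loop invariant of the sweep: pre is the consumed prefix of items2, acc its value sum,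
-- and every consumed key is below every remaining key of items1
theorem pvSweep_eq (t1 : List (Int × Int)) :
    ∀ (pre rest2 : List (Int × Int)) (wins : Int),
      rest2.Pairwise (fun a b => a.1 ≤ b.1) →
      t1.Pairwise (fun a b => a.1 ≤ b.1) →
      (∀ p ∈ pre, ∀ q ∈ t1, p.1 < q.1) →
      pvSweep t1 rest2 ((pre.map (·.2)).sum) wins
        = wins + (t1.map (fun p =>
            p.2 * (((pre ++ rest2).filter (fun q => decide (q.1 < p.1))).map (·.2)).sum)).sum := by
  induction t1 with
  | nil => intro pre rest2 wins _ _ _; simp [pvSweep]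
  | cons a t1 ih =>
      obtain ⟨k1, v1⟩ := a
      intro pre rest2 wins hs2 hs1 hpre
      rcases List.pairwise_cons.mp hs1 with ⟨hk1, ht1⟩
      have hacc : (pre.map (·.2)).sum + ((rest2.takeWhile (fun q => decide (q.1 < k1))).map (·.2)).sum
          = (((pre ++ rest2.takeWhile (fun q => decide (q.1 < k1))).map (·.2)).sum) := by simp
      have hfk1 : (((pre ++ rest2).filter (fun q => decide (q.1 < k1))).map (·.2)).sum
          = (((pre ++ rest2.takeWhile (fun q => decide (q.1 < k1))).map (·.2)).sum) := by
        have hpref : pre.filter (fun q => decide (q.1 < k1)) = pre := by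
          apply List.filter_eq_self.mpr
          intro q hq
          exact decide_eq_true (hpre q hq (k1, v1) List.mem_cons_self)
        rw [List.filter_append, hpref, pv_filter_eq_takeWhile k1 rest2 hs2]
      have hstep : pvSweep ((k1, v1) :: t1) rest2 ((pre.map (·.2)).sum) wins
          = pvSweep t1 (rest2.dropWhile (fun q => decide (q.1 < k1)))
              (((pre ++ rest2.takeWhile (fun q => decide (q.1 < k1))).map (·.2)).sum)
              (wins + v1 * (((pre ++ rest2.takeWhile (fun q => decide (q.1 < k1))).map (·.2)).sum)) := by
        simp only [pvSweep, pvAdvance_eq, hacc]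
      rw [hstep, ih (pre ++ rest2.takeWhile (fun q => decide (q.1 < k1)))
            (rest2.dropWhile (fun q => decide (q.1 < k1)))
            (wins + v1 * (((pre ++ rest2.takeWhile (fun q => decide (q.1 < k1))).map (·.2)).sum))
            (hs2.sublist (List.dropWhile_sublist _))
            ht1
            (by
              intro p hp q hq
              rcases List.mem_append.mp hp with hp | hp
              · exact hpre p hp q (List.mem_cons_of_mem _ hq)
              · have h1 : p.1 < k1 := by
                  have := List.mem_takeWhile_imp hp
                  simpa using this
                exact lt_of_lt_of_le h1 (hk1 q hq))]
      rw [List.append_assoc, List.takeWhile_append_dropWhile]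
      simp only [List.map_cons, List.sum_cons, hfk1]
      ring

theorem pv_B_eq (l1 l2 : List (Int × Int)) :
    calcWins_alt l1 l2 = pvM (PySem.Dict.ofList l1).items (PySem.Dict.ofList l2).items := by
  unfold calcWins_alt
  have hs1 := PySem.List.sorted_pairwise (PySem.Dict.ofList l1).items (fun p => p.1)
  have hs2 := PySem.List.sorted_pairwise (PySem.Dict.ofList l2).items (fun p => p.1)
  have hB := pvSweep_eq (PySem.List.sorted (PySem.Dict.ofList l1).items (fun p => p.1) false)
      [] (PySem.List.sorted (PySem.Dict.ofList l2).items (fun p => p.1) false) 0 hs2 hs1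
      (by intro p hp; simp at hp)
  rw [show (0 : Int) = (([] : List (Int × Int)).map (·.2)).sum from rfl] at hB ⊢
  rw [hB]
  simp only [List.nil_append, zero_add, List.map_nil, List.sum_nil]
  have hin : ∀ k1 : Int,
      (((PySem.List.sorted (PySem.Dict.ofList l2).items (fun p => p.1) false).filter
          (fun q => decide (q.1 < k1))).map (·.2)).sum
      = ((PySem.Dict.ofList l2).items.map (fun q => if q.1 < k1 then q.2 else 0)).sum := by
    intro k1
    rw [pv_sum_map_filter, pv_sum_perm (PySem.List.sorted_perm _ _ _)]
    simp
  simp only [hin]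
  rw [pv_sum_perm (PySem.List.sorted_perm _ _ _)]
  rfl

-- ===== VERDICT (by name: the statement is the Claim_ definition above) =====
theorem calcWins_spec : Claim_equal_calcWins := by
  intro l1 l2 _
  unfold Spec_calcWins
  rw [pv_A_eq, pv_B_eq]
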